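-- pv_equiv track=rewrite | github.com/nyucel/blm2010 | final/180401076.py | totalxi
-- ===== SOURCE A (Python) =====
-- def totalxi(n):
--
--     total_x_kare = [] #total_x_kare adında bir dizi olusturduk.
--
--     for j in range(1, 13, 1):
--
--         kare_x = 0     #kare_x in ilk değerini 0 a eşitledik.
--
--         for p in range(n):
--
--             kare_x += (p + 1) ** j  #dizideki eleman sayısı kadar, x lerin karelerini hesaplattık
--
--         total_x_kare.append(kare_x)
--
--     total_x_kare.insert(0, n)   #hesaplattığımız değerleri diziye ekledik
--
--     return total_x_kare
-- ===== SOURCE B (Python) =====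
-- def totalxi(n):
--     # Faulhaber closed forms: each power sum sum_{p=1}^{n} p^j for j=1..12 in O(1),
--     # with m = max(n, 0) since range(n) is empty for n <= 0.
--     m = max(n, 0)
--     return [
--         n,
--         (m**2 + m) // 2,
--         (2*m**3 + 3*m**2 + m) // 6,
--         (m**4 + 2*m**3 + m**2) // 4,
--         (6*m**5 + 15*m**4 + 10*m**3 - m) // 30,
--         (2*m**6 + 6*m**5 + 5*m**4 - m**2) // 12,
--         (6*m**7 + 21*m**6 + 21*m**5 - 7*m**3 + m) // 42,
--         (3*m**8 + 12*m**7 + 14*m**6 - 7*m**4 + 2*m**2) // 24,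
--         (10*m**9 + 45*m**8 + 60*m**7 - 42*m**5 + 20*m**3 - 3*m) // 90,
--         (2*m**10 + 10*m**9 + 15*m**8 - 14*m**6 + 10*m**4 - 3*m**2) // 20,
--         (6*m**11 + 33*m**10 + 55*m**9 - 66*m**7 + 66*m**5 - 33*m**3 + 5*m) // 66,
--         (2*m**12 + 12*m**11 + 22*m**10 - 33*m**8 + 44*m**6 - 33*m**4 + 10*m**2) // 24,
--         (210*m**13 + 1365*m**12 + 2730*m**11 - 5005*m**9 + 8580*m**7 - 9009*m**5 + 4550*m**3 - 691*m) // 2730,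
--     ]
-- ===== Notes on version B (the rewrite author's own statement) =====
-- stated objective: faster
-- what changed: Replaces A's O(n) summation loop per power with the exact Faulhaber closed-form polynomial for each power sum j=1..12, evaluated at max(n,0).
import Mathlib
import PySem

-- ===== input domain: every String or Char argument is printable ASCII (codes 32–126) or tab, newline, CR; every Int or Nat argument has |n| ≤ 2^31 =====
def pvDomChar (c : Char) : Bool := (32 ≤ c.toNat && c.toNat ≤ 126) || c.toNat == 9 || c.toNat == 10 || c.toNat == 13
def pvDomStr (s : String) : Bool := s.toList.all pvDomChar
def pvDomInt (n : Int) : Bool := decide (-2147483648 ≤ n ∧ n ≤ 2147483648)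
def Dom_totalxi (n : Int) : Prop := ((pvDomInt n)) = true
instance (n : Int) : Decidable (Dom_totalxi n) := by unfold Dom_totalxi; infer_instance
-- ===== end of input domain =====

-- B replaces A's O(n) inner summation loops by the exact Faulhaber closed-form
-- polynomial for each power sum (O(1) per entry).

-- ===== PORT A =====
-- (p+1)**j with j drawn from range(1,13): j is a positive Int, ported as ^ j.toNat
def totalxi (n : Int) : List Int :=
  let total_x_kare : List Int :=
    (PySem.List.pyRange 1 13 1).foldl
      (fun acc j =>
        let kare_x := (PySem.List.pyRange 0 n 1).foldl
          (fun k p => k + (p + 1) ^ j.toNat) 0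
        acc ++ [kare_x]) []
  PySem.List.insert total_x_kare 0 n

-- ===== PORT B =====
def totalxi_alt (n : Int) : List Int :=
  let m := max n 0
  [ n,
    PySem.Int.floordiv (m^2 + m) 2,
    PySem.Int.floordiv (2*m^3 + 3*m^2 + m) 6,
    PySem.Int.floordiv (m^4 + 2*m^3 + m^2) 4,
    PySem.Int.floordiv (6*m^5 + 15*m^4 + 10*m^3 - m) 30,
    PySem.Int.floordiv (2*m^6 + 6*m^5 + 5*m^4 - m^2) 12,
    PySem.Int.floordiv (6*m^7 + 21*m^6 + 21*m^5 - 7*m^3 + m) 42,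
    PySem.Int.floordiv (3*m^8 + 12*m^7 + 14*m^6 - 7*m^4 + 2*m^2) 24,
    PySem.Int.floordiv (10*m^9 + 45*m^8 + 60*m^7 - 42*m^5 + 20*m^3 - 3*m) 90,
    PySem.Int.floordiv (2*m^10 + 10*m^9 + 15*m^8 - 14*m^6 + 10*m^4 - 3*m^2) 20,
    PySem.Int.floordiv (6*m^11 + 33*m^10 + 55*m^9 - 66*m^7 + 66*m^5 - 33*m^3 + 5*m) 66,
    PySem.Int.floordiv (2*m^12 + 12*m^11 + 22*m^10 - 33*m^8 + 44*m^6 - 33*m^4 + 10*m^2) 24,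
    PySem.Int.floordiv (210*m^13 + 1365*m^12 + 2730*m^11 - 5005*m^9 + 8580*m^7 - 9009*m^5 + 4550*m^3 - 691*m) 2730 ]

-- ===== PRECONDITION & SPEC =====
def Spec_totalxi (n : Int) (out : List Int) : Prop := out = totalxi_alt n
instance (n : Int) (out : List Int) : Decidable (Spec_totalxi n out) := by unfold Spec_totalxi; infer_instance

-- ===== CLAIM (what is proved, stated in full; the proofs are below) =====
def Claim_equal_totalxi : Prop := ∀ (n : Int), Dom_totalxi n → Spec_totalxi n (totalxi n)

-- ===== LEMMAS AND PROOFS =====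

-- A's inner loop: sum of (p+1)^j over range(n)
def powSum (j : Nat) (n : Int) : Int :=
  (PySem.List.pyRange 0 n 1).foldl (fun k p => k + (p + 1) ^ j) 0

-- recursive power sum over Nat
def T (j : Nat) : Nat → Int
  | 0 => 0
  | Nat.succ m => T j m + ((m : Int) + 1) ^ j

theorem powSum_nonpos (j : Nat) (n : Int) (h : n ≤ 0) : powSum j n = 0 := by
  simp [powSum, PySem.List.pyRange_one_eq_nil h]

theorem foldl_add_pow (j : Nat) (l : List Int) (a : Int) :
    l.foldl (fun k p => k + (p + 1) ^ j) a = a + l.foldl (fun k p => k + (p + 1) ^ j) 0 := by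
  induction l generalizing a with
  | nil => simp
  | cons x xs ih => simp only [List.foldl_cons]; rw [ih, ih ((0:Int) + _)]; ring

theorem powSum_natCast (j m : Nat) : powSum j (m : Int) = T j m := by
  induction m with
  | zero => simp [powSum, PySem.List.pyRange_one_eq_nil (by norm_num : (0:Int) ≤ 0), T]
  | succ m ih =>
    have h : PySem.List.pyRange 0 ((m : Int) + 1) 1
        = PySem.List.pyRange 0 (m : Int) 1 ++ [(m : Int)] :=
      PySem.List.pyRange_one_succ_right (by positivity)
    simp only [powSum, Nat.cast_succ, h, List.foldl_append, List.foldl_cons, List.foldl_nil] at *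
    rw [foldl_add_pow]
    simp only [T]
    rw [← ih]
    ring

-- generic Faulhaber helper: a polynomial with the right difference equation equals d * T j
theorem poly_eq_T (f : Int → Int) (d : Int) (j : Nat)
    (h0 : f 0 = 0) (hs : ∀ x : Int, f (x + 1) = f x + d * (x + 1) ^ j) :
    ∀ m : Nat, f (m : Int) = d * T j m := by
  intro m
  induction m with
  | zero => simpa [T] using h0
  | succ m ih =>
    have := hs (m : Int)
    rw [Nat.cast_succ, this, ih, T]
    ring

theorem floordiv_mul (d s : Int) (hd : 0 < d) : PySem.Int.floordiv (d * s) d = s := by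
  rw [PySem.Int.floordiv_eq_ediv_of_pos hd]
  exact Int.mul_ediv_cancel_left s (by omega)

theorem entry (j : Nat) (d : Int) (hd : 0 < d) (f : Int → Int)
    (h0 : f 0 = 0) (hs : ∀ x : Int, f (x + 1) = f x + d * (x + 1) ^ j) (m : Nat) :
    PySem.Int.floordiv (f (m : Int)) d = T j m := by
  rw [poly_eq_T f d j h0 hs m, floordiv_mul d _ hd]

-- evaluate A on the closed outer range
theorem totalxi_eval (n : Int) :
    totalxi n = [n, powSum 1 n, powSum 2 n, powSum 3 n, powSum 4 n, powSum 5 n,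
      powSum 6 n, powSum 7 n, powSum 8 n, powSum 9 n, powSum 10 n, powSum 11 n, powSum 12 n] := by
  rfl

theorem totalxi_eq_alt (n : Int) : totalxi n = totalxi_alt n := by
  rw [totalxi_eval]
  by_cases hn : n ≤ 0
  · have hm : max n 0 = 0 := by omega
    simp [totalxi_alt, hm, powSum_nonpos _ _ hn, PySem.Int.floordiv]
  · obtain ⟨m, rfl⟩ : ∃ m : Nat, n = (m : Int) := ⟨n.toNat, by omega⟩
    have hm : max (m : Int) 0 = (m : Int) := by omega
    simp only [totalxi_alt, hm, powSum_natCast]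
    have h1 := entry 1 2 (by norm_num) (fun x => x^2 + x) (by norm_num) (fun x => by ring) m
    simp only at h1
    have h2 := entry 2 6 (by norm_num) (fun x => 2*x^3 + 3*x^2 + x) (by norm_num) (fun x => by ring) m
    simp only at h2
    have h3 := entry 3 4 (by norm_num) (fun x => x^4 + 2*x^3 + x^2) (by norm_num) (fun x => by ring) m
    simp only at h3
    have h4 := entry 4 30 (by norm_num) (fun x => 6*x^5 + 15*x^4 + 10*x^3 - x) (by norm_num) (fun x => by ring) m
    simp only at h4
    have h5 := entry 5 12 (by norm_num) (fun x => 2*x^6 + 6*x^5 + 5*x^4 - x^2) (by norm_num) (fun x => by ring) m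
    simp only at h5
    have h6 := entry 6 42 (by norm_num) (fun x => 6*x^7 + 21*x^6 + 21*x^5 - 7*x^3 + x) (by norm_num) (fun x => by ring) m
    simp only at h6
    have h7 := entry 7 24 (by norm_num) (fun x => 3*x^8 + 12*x^7 + 14*x^6 - 7*x^4 + 2*x^2) (by norm_num) (fun x => by ring) m
    simp only at h7
    have h8 := entry 8 90 (by norm_num) (fun x => 10*x^9 + 45*x^8 + 60*x^7 - 42*x^5 + 20*x^3 - 3*x) (by norm_num) (fun x => by ring) m
    simp only at h8
    have h9 := entry 9 20 (by norm_num) (fun x => 2*x^10 + 10*x^9 + 15*x^8 - 14*x^6 + 10*x^4 - 3*x^2) (by norm_num) (fun x => by ring) m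
    simp only at h9
    have h10 := entry 10 66 (by norm_num) (fun x => 6*x^11 + 33*x^10 + 55*x^9 - 66*x^7 + 66*x^5 - 33*x^3 + 5*x) (by norm_num) (fun x => by ring) m
    simp only at h10
    have h11 := entry 11 24 (by norm_num) (fun x => 2*x^12 + 12*x^11 + 22*x^10 - 33*x^8 + 44*x^6 - 33*x^4 + 10*x^2) (by norm_num) (fun x => by ring) m
    simp only at h11
    have h12 := entry 12 2730 (by norm_num) (fun x => 210*x^13 + 1365*x^12 + 2730*x^11 - 5005*x^9 + 8580*x^7 - 9009*x^5 + 4550*x^3 - 691*x) (by norm_num) (fun x => by ring) m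
    simp only at h12
    rw [h1, h2, h3, h4, h5, h6, h7, h8, h9, h10, h11, h12]

-- ===== VERDICT (by name: the statement is the Claim_ definition above) =====
theorem totalxi_spec : Claim_equal_totalxi := by
  intro n _
  unfold Spec_totalxi
  exact totalxi_eq_alt n
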